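-- pv_equiv track=rewrite | github.com/isabellagmz/ECE143HW5 | word_processing.py | get_longest_words_startswith
-- ===== SOURCE A (Python) =====
-- def get_longest_words_startswith(words,start):
--     '''
--     This function finds the longest word that begins with the letter
--     "start"
--
--     :param words: list with all words
--     :param start: the letter with which the longest word will start
--     :return: the longest word that begins with the given letter
--     '''
--
--     # check that words is a list of strings
--     assert type(words) == list
--     for word in range(len(words)):
--         assert type(words[word]) == str
--
--     # check that start is a single letter and str
--     assert type(start) == str
--     assert len(start) == 1
--
--     # make start lowercase
--     if start.isupper() == True:
--         start = start.lower()
--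
--     words_with_start_letter = []
--
--     for word in range(len(words)):
--         first_letter = words[word][0]
--         # make a list with all words that begin with "start"
--         if start == first_letter:
--             words_with_start_letter.append(words[word])
--
--     list_of_lenghts = []
--
--     # make a list with all the word lengths
--     for word in range(len(words_with_start_letter)):
--         list_of_lenghts.append(len(words_with_start_letter[word]))
--
--     longest_word_length = max(list_of_lenghts)
--
--     for l in range(len(list_of_lenghts)):
--         if list_of_lenghts[l] == longest_word_length:
--             longest_word = words_with_start_letter[l]
--
--     return longest_word
-- ===== SOURCE B (Python) =====
-- def get_longest_words_startswith(words, start):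
--     '''Return the longest word beginning with the given letter (last wins on ties).'''
--     # check that words is a list of strings
--     assert type(words) == list
--     for w in words:
--         assert type(w) == str
--
--     # check that start is a single letter and str
--     assert type(start) == str
--     assert len(start) == 1
--
--     start = start.lower()
--
--     best = None
--     for w in words:
--         if w[0] == start and (best is None or len(w) >= len(best)):
--             best = w
--     return best
-- ===== Notes on version B (the rewrite author's own statement) =====
-- stated objective: simpler
-- what changed: Replaced A's three sequential passes (build filtered list, build lengths list, max, then index-scan for the last longest) by a single loop maintaining the best matching word; Pre_ excludes exactly the inputs where A raises (start not a single character, an empty word string, or no word starting with the lowercased letter).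
import Mathlib
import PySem

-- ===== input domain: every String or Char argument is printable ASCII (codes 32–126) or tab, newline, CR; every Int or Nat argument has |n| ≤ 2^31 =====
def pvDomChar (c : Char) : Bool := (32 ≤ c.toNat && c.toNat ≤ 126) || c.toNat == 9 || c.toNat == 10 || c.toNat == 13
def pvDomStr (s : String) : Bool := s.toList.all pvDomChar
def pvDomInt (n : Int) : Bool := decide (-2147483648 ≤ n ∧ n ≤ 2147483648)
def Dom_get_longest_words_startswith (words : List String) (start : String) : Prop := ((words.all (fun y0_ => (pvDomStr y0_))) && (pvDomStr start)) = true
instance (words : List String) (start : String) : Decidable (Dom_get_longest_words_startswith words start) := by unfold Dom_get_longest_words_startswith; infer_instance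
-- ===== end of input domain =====

-- B replaces A's three sequential passes (filter, lengths, max, last index scan) by one
-- loop maintaining the best matching word (objective: simpler, O(1) extra space).

-- ===== PORT A =====
-- Python str.isupper() (ASCII domain): some cased character and no lowercase one
def pyStrIsupper (s : String) : Bool :=
  s.toList.all (fun c => !PySem.Chars.islower c) && s.toList.any (fun c => PySem.Chars.isupper c)

def get_longest_words_startswith (words : List String) (start : String) : String :=
  let start := if pyStrIsupper start then PySem.Str.lower start else start
  let words_with_start_letter : List String :=
    (PySem.List.pyRange 0 (words.length : Int)).foldl
      (fun acc word =>
        if start == String.ofList [(PySem.Str.pyGet? (PySem.List.pyGetD words word "") 0).getD ' ']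
        then acc ++ [PySem.List.pyGetD words word ""] else acc) []
  let list_of_lenghts : List Int :=
    (PySem.List.pyRange 0 (words_with_start_letter.length : Int)).foldl
      (fun acc word => acc ++ [PySem.Str.len (PySem.List.pyGetD words_with_start_letter word "")]) []
  let longest_word_length : Int := (PySem.List.max? list_of_lenghts (fun x => x)).getD 0
  (PySem.List.pyRange 0 (list_of_lenghts.length : Int)).foldl
    (fun longest_word l =>
      if PySem.List.pyGetD list_of_lenghts l 0 == longest_word_length
      then PySem.List.pyGetD words_with_start_letter l ""
      else longest_word) ""

-- ===== PORT B =====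
def get_longest_words_startswith_alt (words : List String) (start : String) : String :=
  let start := PySem.Str.lower start
  let best : Option String := words.foldl
    (fun best w =>
      if (String.ofList [(PySem.Str.pyGet? w 0).getD ' '] == start) &&
         (best.isNone || decide (PySem.Str.len w ≥ PySem.Str.len (best.getD ""))) then some w else best)
    none
  best.getD ""   -- Source B returns None here, which is no String; unreachable inside Pre_

-- ===== PRECONDITION & SPEC =====
-- Pre_ is exactly where Python A returns: start a single character (assert), every word
-- nonempty (else words[word][0] raises IndexError), and some word starting with the
-- lowercased start (else max([]) raises ValueError).
def Pre_get_longest_words_startswith (words : List String) (start : String) : Prop :=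
  start.toList.length = 1 ∧
  (∀ w ∈ words, w.toList ≠ []) ∧
  (∃ w ∈ words, w.toList.headD ' ' = PySem.Chars.lowerChar (start.toList.headD ' '))
instance (words : List String) (start : String) : Decidable (Pre_get_longest_words_startswith words start) := by unfold Pre_get_longest_words_startswith; infer_instance

def pvWitness_get_longest_words_startswith : List String × String := (["apple", "Bee", "ant"], "A")

def Spec_get_longest_words_startswith (words : List String) (start : String) (out : String) : Prop := out = get_longest_words_startswith_alt words start
instance (words : List String) (start : String) (out : String) : Decidable (Spec_get_longest_words_startswith words start out) := by unfold Spec_get_longest_words_startswith; infer_instance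

-- ===== CLAIM (what is proved, stated in full; the proofs are below) =====
def Claim_equal_get_longest_words_startswith : Prop := ∀ (words : List String) (start : String), Dom_get_longest_words_startswith words start → Pre_get_longest_words_startswith words start → Spec_get_longest_words_startswith words start (get_longest_words_startswith words start)

-- ===== LEMMAS AND PROOFS =====

-- accumulate-append loop = filter
theorem pv_foldl_filter (p : String → Bool) (l : List String) (acc : List String) :
    l.foldl (fun acc w => if p w then acc ++ [w] else acc) acc = acc ++ l.filter p := by
  induction l generalizing acc with
  | nil => simp
  | cons w t ih => by_cases h : p w <;> simp [h, ih]

-- last-match index scan = getLastD of the filter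
theorem pv_foldl_lastScan (m : Int) (l : List String) (a : String) :
    l.foldl (fun acc w => if PySem.Str.len w == m then w else acc) a
      = (l.filter (fun w => PySem.Str.len w == m)).getLastD a := by
  induction l generalizing a with
  | nil => simp
  | cons w t ih =>
    cases h : (PySem.Str.len w == m) with
    | true =>
      simp only [List.foldl_cons, List.filter_cons, h, if_true, List.getLastD_cons]
      exact ih w
    | false =>
      simp only [List.foldl_cons, List.filter_cons, h, Bool.false_eq_true, if_false]
      exact ih a

-- default of getLastD is irrelevant for a nonempty list
theorem pv_getLastD_ne_nil {l : List String} (h : l ≠ []) (a b : String) :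
    l.getLastD a = l.getLastD b := by
  have hn : l.getLast? ≠ none := by simpa [List.getLast?_eq_none_iff] using h
  cases hg : l.getLast? with
  | none => exact absurd hg hn
  | some x => simp [List.getLastD_eq_getLast?, hg]

-- a running max is either its seed or attained
theorem pv_foldl_max_attained (lens : List Int) (a : Int) :
    lens.foldl max a = a ∨ lens.foldl max a ∈ lens := by
  induction lens generalizing a with
  | nil => left; rfl
  | cons x xs ih =>
    simp only [List.foldl_cons]
    rcases ih (max a x) with h | h
    · rw [h]
      rcases max_choice a x with hm | hm
      · left; exact hm
      · right; rw [hm]; exact List.mem_cons_self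
    · right; exact List.mem_cons_of_mem _ h

-- B's loop ignores non-matching words
theorem pv_bfold_filter (p : String → Bool) (l : List String) (st : Option String) :
    l.foldl (fun best w =>
        if p w && (best.isNone || decide (PySem.Str.len w ≥ PySem.Str.len (best.getD "")))
        then some w else best) st
      = (l.filter p).foldl (fun best w =>
        if best.isNone || decide (PySem.Str.len w ≥ PySem.Str.len (best.getD ""))
        then some w else best) st := by
  induction l generalizing st with
  | nil => rfl
  | cons w t ih =>
    cases h : p w with
    | true =>
      simp only [List.foldl_cons, List.filter_cons, h, Bool.true_and, if_true]
      exact ih _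
    | false =>
      simp only [List.foldl_cons, List.filter_cons, h, Bool.false_and, Bool.false_eq_true, if_false]
      exact ih st

-- invariant of B's best loop once a word is held
theorem pv_bfold_inv (t : List String) (b : String) :
    t.foldl (fun best w =>
        if best.isNone || decide (PySem.Str.len w ≥ PySem.Str.len (best.getD ""))
        then some w else best) (some b)
      = some ((t.filter (fun w => PySem.Str.len w == (t.map PySem.Str.len).foldl max (PySem.Str.len b))).getLastD b) := by
  induction t generalizing b with
  | nil => simp
  | cons w t ih =>
    simp only [List.foldl_cons, List.map_cons, List.filter_cons, Option.isNone_some,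
      Bool.false_or, Option.getD_some]
    by_cases hge : PySem.Str.len w ≥ PySem.Str.len b
    · rw [if_pos (by simpa using hge)]
      have hmax : max (PySem.Str.len b) (PySem.Str.len w) = PySem.Str.len w := max_eq_right hge
      rw [ih w, hmax]
      by_cases he : PySem.Str.len w = (t.map PySem.Str.len).foldl max (PySem.Str.len w)
      · have hb : (PySem.Str.len w == (t.map PySem.Str.len).foldl max (PySem.Str.len w)) = true := by
          simpa using he
        rw [hb, if_pos rfl, List.getLastD_cons]
      · have hb : (PySem.Str.len w == (t.map PySem.Str.len).foldl max (PySem.Str.len w)) = false := by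
          simpa using he
        rw [hb]
        simp only [Bool.false_eq_true, if_false]
        rcases pv_foldl_max_attained (t.map PySem.Str.len) (PySem.Str.len w) with hc | hc
        · exact absurd hc.symm he
        · rcases List.mem_map.mp hc with ⟨u, hu, hlu⟩
          have hne : (t.filter (fun w' => PySem.Str.len w' == (t.map PySem.Str.len).foldl max (PySem.Str.len w))) ≠ [] := by
            intro hnil
            have : u ∈ t.filter (fun w' => PySem.Str.len w' == (t.map PySem.Str.len).foldl max (PySem.Str.len w)) :=
              List.mem_filter.mpr ⟨hu, by simpa using hlu⟩
            rw [hnil] at this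
            exact absurd this (List.not_mem_nil)
          rw [pv_getLastD_ne_nil hne w b]
    · rw [if_neg (by simpa using hge)]
      have hmax : max (PySem.Str.len b) (PySem.Str.len w) = PySem.Str.len b :=
        max_eq_left (le_of_not_ge hge)
      rw [ih b, hmax]
      have hlt : PySem.Str.len w < PySem.Str.len b := lt_of_not_ge hge
      have hble : PySem.Str.len b ≤ (t.map PySem.Str.len).foldl max (PySem.Str.len b) :=
        (PySem.List.le_foldl_max _ _).1
      have hb : (PySem.Str.len w == (t.map PySem.Str.len).foldl max (PySem.Str.len b)) = false := by
        simp only [beq_eq_false_iff_ne]; omega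
      rw [hb]
      simp only [Bool.false_eq_true, if_false]

theorem pv_beq_comm (a b : String) : (a == b) = (b == a) := by
  by_cases h : a = b <;> simp [h, Ne.symm]

-- the effective start string is the single lowercased character (A's conditional form)
theorem pv_s2_toList (start : String) (h1 : start.toList.length = 1) :
    (if pyStrIsupper start then PySem.Str.lower start else start).toList
      = [PySem.Chars.lowerChar (start.toList.headD ' ')] := by
  obtain ⟨c, hc⟩ := List.length_eq_one_iff.mp h1
  by_cases hu : pyStrIsupper start
  · rw [if_pos hu, PySem.Str.toList_lower, hc]
    simp [PySem.Chars.lower]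
  · rw [if_neg hu, hc]
    by_cases hup : PySem.Chars.isupper c
    · exfalso
      have hfalse : pyStrIsupper start = false := by simpa using hu
      unfold pyStrIsupper at hfalse
      rw [hc] at hfalse
      simp only [List.all_cons, List.all_nil, Bool.and_true, List.any_cons, List.any_nil,
        Bool.or_false, hup, Bool.and_true, Bool.not_eq_false'] at hfalse
      have h1' : 'a' ≤ c := by
        have := hfalse
        simp [PySem.Chars.islower] at this
        exact this.1
      have h2' : c ≤ 'Z' := by
        simp [PySem.Chars.isupper] at hup
        exact hup.2
      have : ('a' : Char) ≤ 'Z' := le_trans h1' h2'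
      exact absurd this (by decide)
    · simp [PySem.Chars.lowerChar, hup]

-- A's conditional lowercase equals B's unconditional one (on a single character)
theorem pv_s2_eq (start : String) (h1 : start.toList.length = 1) :
    (if pyStrIsupper start then PySem.Str.lower start else start) = PySem.Str.lower start := by
  obtain ⟨c, hc⟩ := List.length_eq_one_iff.mp h1
  have hA := pv_s2_toList start h1
  have hB : (PySem.Str.lower start).toList = [PySem.Chars.lowerChar (start.toList.headD ' ')] := by
    rw [PySem.Str.toList_lower, hc]
    simp [PySem.Chars.lower]
  calc (if pyStrIsupper start then PySem.Str.lower start else start)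
      = String.ofList (if pyStrIsupper start then PySem.Str.lower start else start).toList := by
        rw [String.ofList_toList]
    _ = String.ofList (PySem.Str.lower start).toList := by rw [hA, hB]
    _ = PySem.Str.lower start := String.ofList_toList

-- the third index loop over lengths is a last-match scan over the words
theorem pv_loop3 (l : List String) (m : Int) :
    (PySem.List.pyRange 0 (((l.map PySem.Str.len).length : Nat) : Int)).foldl
      (fun acc j => if PySem.List.pyGetD (l.map PySem.Str.len) j 0 == m
                    then PySem.List.pyGetD l j "" else acc) ""
      = l.foldl (fun acc w => if PySem.Str.len w == m then w else acc) "" := by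
  have hfun : (fun (acc : String) (j : Int) =>
        if PySem.List.pyGetD (l.map PySem.Str.len) j 0 == m then PySem.List.pyGetD l j "" else acc)
      = (fun (acc : String) (j : Int) =>
        if PySem.Str.len (PySem.List.pyGetD l j "") == m then PySem.List.pyGetD l j "" else acc) := by
    funext acc j
    rw [show (0:Int) = PySem.Str.len "" by simp, PySem.List.pyGetD_map]
  rw [show (((l.map PySem.Str.len).length : Nat) : Int) = ((l.length : Nat) : Int) by simp, hfun,
    PySem.List.foldl_pyRange_zero_pyGetD' l "" (fun acc w => if PySem.Str.len w == m then w else acc) ""]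

-- core: on the nonempty filtered list, A's max-then-last-scan equals B's best loop
theorem pv_core (w0 : String) (t : List String) :
    ((w0 :: t).foldl (fun acc w =>
        if PySem.Str.len w == (PySem.List.max? ((w0 :: t).map PySem.Str.len) (fun x => x)).getD 0
        then w else acc) "")
      = (((w0 :: t).foldl
          (fun best w => if best.isNone || decide (PySem.Str.len w ≥ PySem.Str.len (best.getD ""))
                         then some w else best)
          (none : Option String)).getD "") := by
  rw [List.map_cons, PySem.List.max?_id_cons, Option.getD_some]
  rw [pv_foldl_lastScan]
  conv_rhs => rw [List.foldl_cons]
  rw [if_pos (by simp)]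
  rw [pv_bfold_inv t w0]
  rw [List.filter_cons]
  cases hb : (PySem.Str.len w0 == (t.map PySem.Str.len).foldl max (PySem.Str.len w0)) with
  | true => rw [if_pos rfl, List.getLastD_cons, Option.getD_some]
  | false =>
    rw [if_neg (by simp), Option.getD_some]
    have he : PySem.Str.len w0 ≠ (t.map PySem.Str.len).foldl max (PySem.Str.len w0) := by
      simpa using hb
    rcases pv_foldl_max_attained (t.map PySem.Str.len) (PySem.Str.len w0) with hc | hc
    · exact absurd hc.symm he
    · rcases List.mem_map.mp hc with ⟨u, hu, hlu⟩
      have hne : (t.filter (fun w => PySem.Str.len w == (t.map PySem.Str.len).foldl max (PySem.Str.len w0))) ≠ [] := by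
        intro hnil
        have : u ∈ t.filter (fun w => PySem.Str.len w == (t.map PySem.Str.len).foldl max (PySem.Str.len w0)) :=
          List.mem_filter.mpr ⟨hu, by simpa using hlu⟩
        rw [hnil] at this
        exact absurd this (List.not_mem_nil)
      exact pv_getLastD_ne_nil hne "" w0

-- ===== VERDICT (by name: the statement is the Claim_ definition above) =====
theorem get_longest_words_startswith_spec : Claim_equal_get_longest_words_startswith := by
  intro words start hdom hpre
  obtain ⟨hlen1, hne, hex⟩ := hpre
  unfold Spec_get_longest_words_startswith get_longest_words_startswith get_longest_words_startswith_alt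
  simp only []
  have hs2 : (if pyStrIsupper start then PySem.Str.lower start else start).toList
      = [PySem.Chars.lowerChar (start.toList.headD ' ')] := pv_s2_toList start hlen1
  rw [pv_s2_eq start hlen1] at hs2 ⊢
  generalize hgen : PySem.Str.lower start = s2 at *
  -- A side: collapse the three passes
  rw [PySem.List.foldl_pyRange_zero_pyGetD' words ""
    (fun acc w => if s2 == String.ofList [(PySem.Str.pyGet? w 0).getD ' '] then acc ++ [w] else acc) []]
  rw [pv_foldl_filter, List.nil_append]
  rw [PySem.List.foldl_pyRange_zero_pyGetD'
    (words.filter (fun w => s2 == String.ofList [(PySem.Str.pyGet? w 0).getD ' '])) ""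
    (fun acc w => acc ++ [PySem.Str.len w]) []]
  rw [PySem.List.foldl_append_singleton_eq_map, List.nil_append]
  rw [pv_loop3]
  -- B side: drop non-matching words
  have hswap : (fun (best : Option String) (w : String) =>
      if (String.ofList [(PySem.Str.pyGet? w 0).getD ' '] == s2) &&
         (best.isNone || decide (PySem.Str.len w ≥ PySem.Str.len (best.getD "")))
      then some w else best)
      = (fun (best : Option String) (w : String) =>
      if (fun w => s2 == String.ofList [(PySem.Str.pyGet? w 0).getD ' ']) w &&
         (best.isNone || decide (PySem.Str.len w ≥ PySem.Str.len (best.getD "")))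
      then some w else best) := by
    funext best w
    rw [pv_beq_comm]
  rw [hswap, pv_bfold_filter]
  -- the filtered list is nonempty
  obtain ⟨w, hwmem, hwhead⟩ := hex
  have hp : (fun w => s2 == String.ofList [(PySem.Str.pyGet? w 0).getD ' ']) w = true := by
    have hwl : w.toList ≠ [] := hne w hwmem
    have hget : PySem.Str.pyGet? w 0 = some (w.toList.headD ' ') := by
      cases hw : w.toList with
      | nil => exact absurd hw hwl
      | cons c cs => simp [hw]
    simp only [hget, Option.getD_some, hwhead, beq_iff_eq]
    rw [← String.ofList_toList (s := s2), hs2]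
  have hfne : words.filter (fun w => s2 == String.ofList [(PySem.Str.pyGet? w 0).getD ' ']) ≠ [] := by
    intro hnil
    have : w ∈ words.filter (fun w => s2 == String.ofList [(PySem.Str.pyGet? w 0).getD ' ']) :=
      List.mem_filter.mpr ⟨hwmem, hp⟩
    rw [hnil] at this
    exact absurd this (List.not_mem_nil)
  cases hfl : words.filter (fun w => s2 == String.ofList [(PySem.Str.pyGet? w 0).getD ' ']) with
  | nil => exact absurd hfl hfne
  | cons w0 t => exact pv_core w0 t
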